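-- pv_equiv track=rewrite | github.com/aaarora/glideinwms | lib/condorLogParser.py | countAndInterpretRawStatuses
-- ===== SOURCE A (Python) =====
-- def interpretStatus(status):
--     if status==5:
--         return "Completed"
--     elif status==9:
--         return "Removed"
--     elif status in (1,3,6,10,11,22,23):
--         return "Running"
--     elif status==12:
--         return "Held"
--     elif status in (0,20,26):
--         return "Wait"
--     else:
--         return "Idle"
--
-- def countStatuses(jobs):
--     counts={}
--     for e in jobs.values():
--         try:
--             counts[e]+=1
--         except: # there are only a few possible values, so using exceptions is faster
--             counts[e]=1
--     return counts
--
-- def countAndInterpretRawStatuses(jobs_raw):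
--     outc={}
--     tmpc=countStatuses(jobs_raw)
--     for s in tmpc.keys():
--         i_s=interpretStatus(int(s))
--         try:
--             outc[i_s]+=tmpc[s]
--         except:  # there are only a few possible values, so using exceptions is faster
--             outc[i_s]=tmpc[s]
--     return outc
-- ===== SOURCE B (Python) =====
-- def interpretStatus(status):
--     if status==5:
--         return "Completed"
--     elif status==9:
--         return "Removed"
--     elif status in (1,3,6,10,11,22,23):
--         return "Running"
--     elif status==12:
--         return "Held"
--     elif status in (0,20,26):
--         return "Wait"
--     else:
--         return "Idle"
--
-- def countAndInterpretRawStatuses(jobs_raw):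
--     outc = {}
--     for e in jobs_raw.values():
--         i_s = interpretStatus(int(e))
--         outc[i_s] = outc.get(i_s, 0) + 1
--     return outc
-- ===== Notes on version B (the rewrite author's own statement) =====
-- stated objective: simpler
-- what changed: B drops the intermediate raw-status frequency table (countStatuses) entirely and aggregates interpreted statuses directly in one pass over the values with outc.get(i_s,0)+1, instead of A's two-phase count-then-reinterpret structure.
import Mathlib
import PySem

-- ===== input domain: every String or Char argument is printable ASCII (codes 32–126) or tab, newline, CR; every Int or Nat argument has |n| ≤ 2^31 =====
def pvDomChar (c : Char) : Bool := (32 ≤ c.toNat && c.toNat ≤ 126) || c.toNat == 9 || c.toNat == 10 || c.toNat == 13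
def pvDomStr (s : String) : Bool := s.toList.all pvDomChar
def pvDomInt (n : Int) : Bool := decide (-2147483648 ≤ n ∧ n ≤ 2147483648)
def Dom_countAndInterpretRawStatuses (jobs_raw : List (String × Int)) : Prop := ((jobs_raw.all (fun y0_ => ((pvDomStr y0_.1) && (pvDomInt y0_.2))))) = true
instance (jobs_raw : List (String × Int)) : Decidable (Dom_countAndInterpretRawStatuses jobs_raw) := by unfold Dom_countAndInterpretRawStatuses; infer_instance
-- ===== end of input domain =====

-- B drops A's intermediate raw-status frequency table and aggregates interpreted statuses
-- directly in one pass over the values (objective: simpler).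

-- ===== PORT A =====
def interpretStatus (status : Int) : String :=
  if status = 5 then "Completed"
  else if status = 9 then "Removed"
  else if status ∈ ([1, 3, 6, 10, 11, 22, 23] : List Int) then "Running"
  else if status = 12 then "Held"
  else if status ∈ ([0, 20, 26] : List Int) then "Wait"
  else "Idle"

-- counts[e]+=1 / except: counts[e]=1  ≡  counts[e] = counts.get(e,0)+1
def countStatuses (jobs : List (String × Int)) : PySem.Dict Int Int :=
  (jobs.map (·.2)).foldl (fun counts e => counts.insert e (counts.getD e 0 + 1)) PySem.Dict.empty

def countAndInterpretRawStatuses (jobs_raw : List (String × Int)) : List (String × Int) :=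
  let tmpc := countStatuses jobs_raw
  -- int(s) on an int value is the identity, so interpretStatus(int(s)) = interpretStatus s
  (tmpc.keys.foldl (fun outc s =>
      outc.insert (interpretStatus s) (outc.getD (interpretStatus s) 0 + tmpc.getD s 0))
    PySem.Dict.empty).items

-- ===== PORT B =====
def countAndInterpretRawStatuses_alt (jobs_raw : List (String × Int)) : List (String × Int) :=
  ((jobs_raw.map (·.2)).foldl (fun outc e =>
      outc.insert (interpretStatus e) (outc.getD (interpretStatus e) 0 + 1))
    PySem.Dict.empty).items

-- ===== PRECONDITION & SPEC =====
def Spec_countAndInterpretRawStatuses (jobs_raw : List (String × Int)) (out : List (String × Int)) : Prop := out = countAndInterpretRawStatuses_alt jobs_raw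
instance (jobs_raw : List (String × Int)) (out : List (String × Int)) : Decidable (Spec_countAndInterpretRawStatuses jobs_raw out) := by unfold Spec_countAndInterpretRawStatuses; infer_instance

-- ===== CLAIM (what is proved, stated in full; the proofs are below) =====
def Claim_equal_countAndInterpretRawStatuses : Prop := ∀ (jobs_raw : List (String × Int)), Dom_countAndInterpretRawStatuses jobs_raw → Spec_countAndInterpretRawStatuses jobs_raw (countAndInterpretRawStatuses jobs_raw)

-- ===== LEMMAS AND PROOFS =====

-- value of the generic "bump interpretStatus x by w x" fold
theorem getD_bumpFold (w : Int → Int) (l : List Int) (d : PySem.Dict String Int) (k : String) :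
    (l.foldl (fun d x => d.insert (interpretStatus x) (d.getD (interpretStatus x) 0 + w x)) d).getD k 0
      = d.getD k 0 + ((l.filter (fun x => interpretStatus x == k)).map w).sum := by
  induction l generalizing d with
  | nil => simp
  | cons x l ih =>
      simp only [List.foldl_cons, List.filter_cons, ih, PySem.Dict.getD_insert]
      by_cases h : interpretStatus x = k
      · simp [h]; ring
      · have : (interpretStatus x == k) = false := by simp [h]
        simp [this, Ne.symm h]

-- first-occurrence dedup commutes with mapping through a dedup
theorem ofList_map_ofList (f : Int → String) (vs : List Int) :
    PySem.Set.ofList ((PySem.Set.ofList vs).map f) = PySem.Set.ofList (vs.map f) := by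
  induction vs using List.reverseRecOn with
  | nil => rfl
  | append_singleton vs e ih =>
      rw [List.map_append, List.map_singleton, PySem.Set.ofList_append_singleton]
      by_cases h : e ∈ PySem.Set.ofList vs
      · have hm : f e ∈ PySem.Set.ofList (vs.map f) := by
          rw [PySem.Set.mem_ofList]
          exact List.mem_map_of_mem ((PySem.Set.mem_ofList _ _).mp h)
        rw [PySem.Set.add_of_mem h, ih, PySem.Set.ofList_append_singleton,
            PySem.Set.add_of_mem hm]
      · rw [PySem.Set.add_of_not_mem h, List.map_append, List.map_singleton,
            PySem.Set.ofList_append_singleton, ih, PySem.Set.ofList_append_singleton]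

-- summing the raw-status multiplicities over the distinct raw statuses with a fixed
-- interpretation equals counting jobs with that interpretation directly
theorem sum_counts_eq_countP (vs : List Int) (k : String) :
    (((PySem.Set.ofList vs).filter (fun s => interpretStatus s == k)).map
        (fun s => ((vs.count s : Int)))).sum
      = ((vs.filter (fun x => interpretStatus x == k)).map (fun _ => (1 : Int))).sum := by
  have hperm : (PySem.Set.ofList vs).Perm vs.dedup := by
    rw [List.perm_ext_iff_of_nodup (PySem.Set.nodup_ofList vs) vs.nodup_dedup]
    intro a; rw [PySem.Set.mem_ofList, List.mem_dedup]
  have h1 : (((PySem.Set.ofList vs).filter (fun s => interpretStatus s == k)).map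
        (fun s => ((vs.count s : Int)))).sum
      = (((vs.dedup.filter (fun s => interpretStatus s == k)).map vs.count).sum : Int) := by
    have := ((hperm.filter (fun s => interpretStatus s == k)).map
        (fun s => ((vs.count s : Int)))).sum_eq
    rw [this, Nat.cast_list_sum, List.map_map]
    rfl
  rw [h1, List.sum_map_count_dedup_filter_eq_countP]
  have h2 : ((vs.filter (fun x => interpretStatus x == k)).map (fun _ => (1 : Int))).sum
      = ((vs.filter (fun x => interpretStatus x == k)).length : Int) := by
    induction vs.filter (fun x => interpretStatus x == k) with
    | nil => simp
    | cons a l ih => simp; omega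
  rw [h2, List.countP_eq_length_filter]

theorem countAndInterpret_eq (jobs_raw : List (String × Int)) :
    countAndInterpretRawStatuses jobs_raw = countAndInterpretRawStatuses_alt jobs_raw := by
  unfold countAndInterpretRawStatuses countAndInterpretRawStatuses_alt countStatuses
  set vs := jobs_raw.map (·.2) with hvs
  rw [PySem.Dict.foldl_insert_getD_add_one_eq_counter]
  -- nodup keys of both result dicts
  have ndA : ((PySem.Dict.counter vs).keys.foldl (fun outc s =>
      outc.insert (interpretStatus s) (outc.getD (interpretStatus s) 0 +
        (PySem.Dict.counter vs).getD s 0)) PySem.Dict.empty).keys.Nodup := by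
    exact PySem.Dict.nodup_keys_foldl_insert_key _ _ _ _ (by simp)
  have ndB : (vs.foldl (fun outc e =>
      outc.insert (interpretStatus e) (outc.getD (interpretStatus e) 0 + 1))
      (PySem.Dict.empty : PySem.Dict String Int)).keys.Nodup := by
    exact PySem.Dict.nodup_keys_foldl_insert_key _ _ _ _ (by simp)
  rw [PySem.Dict.items_eq_map_keys _ ndA 0]
  conv_rhs => rw [PySem.Dict.items_eq_map_keys _ ndB 0]
  have hkA : ((PySem.Dict.counter vs).keys.foldl (fun outc s =>
      outc.insert (interpretStatus s) (outc.getD (interpretStatus s) 0 +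
        (PySem.Dict.counter vs).getD s 0)) PySem.Dict.empty).keys
      = PySem.Set.ofList (vs.map interpretStatus) := by
    rw [PySem.Dict.keys_foldl_insert_key, PySem.Dict.keys_counter, PySem.Dict.keys_empty,
        PySem.Set.update_nil_left, ofList_map_ofList]
  have hkB : (vs.foldl (fun outc e =>
      outc.insert (interpretStatus e) (outc.getD (interpretStatus e) 0 + 1))
      (PySem.Dict.empty : PySem.Dict String Int)).keys = PySem.Set.ofList (vs.map interpretStatus) := by
    rw [PySem.Dict.keys_foldl_insert_key, PySem.Dict.keys_empty, PySem.Set.update_nil_left]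
  rw [hkA, hkB]
  apply List.map_congr_left
  intro k _
  have hA := getD_bumpFold (fun s => (PySem.Dict.counter vs).getD s 0)
      (PySem.Dict.counter vs).keys PySem.Dict.empty k
  have hB := getD_bumpFold (fun _ => (1 : Int)) vs PySem.Dict.empty k
  rw [hA, hB]
  have hw : (((PySem.Dict.counter vs).keys.filter (fun s => interpretStatus s == k)).map
      (fun s => (PySem.Dict.counter vs).getD s 0)).sum
      = (((PySem.Set.ofList vs).filter (fun s => interpretStatus s == k)).map
      (fun s => ((vs.count s : Int)))).sum := by
    rw [PySem.Dict.keys_counter]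
    congr 1
    apply List.map_congr_left
    intro s _
    exact PySem.Dict.getD_counter vs s
  rw [hw, sum_counts_eq_countP]

-- ===== VERDICT (by name: the statement is the Claim_ definition above) =====
theorem countAndInterpretRawStatuses_spec : Claim_equal_countAndInterpretRawStatuses := by
  intro jobs_raw _
  unfold Spec_countAndInterpretRawStatuses
  exact countAndInterpret_eq jobs_raw
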